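-- pv_equiv track=rewrite | github.com/SongWWWWWW/PdfCleaner | PdfCleaner.py | design_without_other_word
-- ===== SOURCE A (Python) =====
-- def design_without_other_word(text:str) -> bool:
--     """
--     判断text之后在\n之前有无字符
--     """
--     for i in text:
--         if i == ' ':
--             continue
--         elif i != '\n':
--             return False
--         elif i == '\n':
--             return True
--     return True
-- ===== SOURCE B (Python) =====
-- def design_without_other_word(text: str) -> bool:
--     i = text.find('\n')
--     prefix = text if i < 0 else text[:i]
--     return prefix.count(' ') == len(prefix)
-- ===== Notes on version B (the rewrite author's own statement) =====
-- stated objective: alternative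
-- what changed: Instead of scanning characters with early returns, B first locates the first newline with find, takes the prefix before it (or the whole string), and decides by counting: the prefix is all spaces iff its space count equals its length.
import Mathlib
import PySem

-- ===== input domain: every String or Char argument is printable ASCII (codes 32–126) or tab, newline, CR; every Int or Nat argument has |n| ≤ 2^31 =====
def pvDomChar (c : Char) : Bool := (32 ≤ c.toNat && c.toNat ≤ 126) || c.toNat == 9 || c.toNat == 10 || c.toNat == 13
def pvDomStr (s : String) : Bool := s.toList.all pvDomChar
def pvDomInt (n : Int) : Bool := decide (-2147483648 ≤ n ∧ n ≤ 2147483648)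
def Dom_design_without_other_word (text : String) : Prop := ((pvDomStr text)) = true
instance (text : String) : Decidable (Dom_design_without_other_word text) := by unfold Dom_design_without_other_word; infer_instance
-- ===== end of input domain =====

-- B locates the first newline, then decides by counting that the prefix before it is all spaces; same value, different decomposition.

-- ===== PORT A =====
-- the for-loop with early returns, as structural recursion over the characters
def pvLoopA : List Char → Bool
  | [] => true
  | c :: rest =>
      if c = ' ' then pvLoopA rest
      else if c ≠ '\n' then false
      else true

def design_without_other_word (text : String) : Bool := pvLoopA text.toList

-- ===== PORT B =====
-- text.find('\n') ported as findIdx? on the code points; text[:i] as take; count / len as List.count / length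
def pvPrefixB (l : List Char) : List Char :=
  match l.findIdx? (· = '\n') with
  | none => l
  | some i => l.take i

def design_without_other_word_alt (text : String) : Bool :=
  (pvPrefixB text.toList).count ' ' == (pvPrefixB text.toList).length

-- ===== PRECONDITION & SPEC =====
def Spec_design_without_other_word (text : String) (out : Bool) : Prop := out = design_without_other_word_alt text
instance (text : String) (out : Bool) : Decidable (Spec_design_without_other_word text out) := by unfold Spec_design_without_other_word; infer_instance

-- ===== CLAIM (what is proved, stated in full; the proofs are below) =====
def Claim_equal_design_without_other_word : Prop := ∀ (text : String), Dom_design_without_other_word text → Spec_design_without_other_word text (design_without_other_word text)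

-- ===== LEMMAS AND PROOFS =====
theorem pvLoopA_eq (l : List Char) :
    pvLoopA l = ((pvPrefixB l).count ' ' == (pvPrefixB l).length) := by
  induction l with
  | nil => rfl
  | cons c rest ih =>
      by_cases hn : c = '\n'
      · simp [pvLoopA, pvPrefixB, List.findIdx?_cons, hn]
      · by_cases hs : c = ' '
        · have hfi : ((c :: rest).findIdx? (· = '\n')) = (rest.findIdx? (· = '\n')).map (· + 1) := by
            simp [List.findIdx?_cons, hn]
          have hpre : pvPrefixB (c :: rest) = c :: pvPrefixB rest := by
            unfold pvPrefixB
            rw [hfi]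
            cases rest.findIdx? (· = '\n') <;> simp
          rw [hpre]
          simp [pvLoopA, hs, hn, ih]
        · -- A returns false; prefix starts with a non-space char, so count < length
          have hfi : ((c :: rest).findIdx? (· = '\n')) = (rest.findIdx? (· = '\n')).map (· + 1) := by
            simp [List.findIdx?_cons, hn]
          have hpre : pvPrefixB (c :: rest) = c :: pvPrefixB rest := by
            unfold pvPrefixB
            rw [hfi]
            cases rest.findIdx? (· = '\n') <;> simp
          rw [hpre]
          have hlt : (c :: pvPrefixB rest).count ' ' < (c :: pvPrefixB rest).length := by
            have h1 : (c :: pvPrefixB rest).count ' ' = (pvPrefixB rest).count ' ' := by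
              simp [List.count_cons, hs]
            have h2 : (pvPrefixB rest).count ' ' ≤ (pvPrefixB rest).length := List.count_le_length
            simp [h1]
            omega
          have : ((c :: pvPrefixB rest).count ' ' == (c :: pvPrefixB rest).length) = false := by
            simp only [beq_eq_false_iff_ne]; omega
          rw [this]
          simp [pvLoopA, hs, hn]

-- ===== VERDICT (by name: the statement is the Claim_ definition above) =====
theorem design_without_other_word_spec : Claim_equal_design_without_other_word := by
  intro text _
  unfold Spec_design_without_other_word design_without_other_word design_without_other_word_alt
  have h := pvLoopA_eq text.toList
  simpa using h
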